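-- pv_equiv track=rewrite | github.com/JihyeHaley/TIL | 17_TwigFarm/Gcon_Diff/word_tag_slice/utils/work_connect_funcs.py | _work_connect_word
-- ===== SOURCE A (Python) =====
-- def _work_connect_word(a_words, b_words, c_words, a, b, c):
--     pre_output_result_list = list()
--     a_completed, b_completed, c_completed = str(), str(), str()
--
--     for jdx in range(len(a_words)):
--         if jdx == 0:
--             if a_words[jdx] != b_words[jdx] or b_words[jdx] != c_words[jdx] or a_words[jdx] != c_words[jdx]:
--                 a_completed += a_words[jdx]
--                 b_completed += b_words[jdx]
--                 c_completed += c_words[jdx]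
--
--             else:
--                 a_completed += f'{a[0]}{a_words[jdx][1:]}'
--                 b_completed += f'{b[0]}{b_words[jdx][1:]}'
--                 c_completed += f'{c[0]}{c_words[jdx][1:]}'
--
--
--         # 마지막 인덱스는 띄어 쓰기 없이 만나기
--         elif jdx == len(a_words) - 1:
--             a_completed += a_words[jdx]
--             b_completed += b_words[jdx]
--             c_completed += c_words[jdx]
--
--         else:
--             # 띄어쓰기
--             a_completed += ' ' + a_words[jdx]
--             b_completed += ' ' + b_words[jdx]
--             c_completed += ' ' + c_words[jdx]
--
--     pre_output_result_list = a_completed, b_completed, c_completed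
--
--     return pre_output_result_list
-- ===== SOURCE B (Python) =====
-- def _work_connect_word(a_words, b_words, c_words, a, b, c):
--     rows = list(zip(a_words, b_words, c_words))
--     all_equal = bool(rows) and rows[0][0] == rows[0][1] == rows[0][2]
--
--     def build(words, ch):
--         if not words:
--             return ''
--         head = ch[0] + words[0][1:] if all_equal else words[0]
--         if len(words) == 1:
--             return head
--         return ' '.join([head, *words[1:-1]]) + words[-1]
--
--     return (build([r[0] for r in rows], a),
--             build([r[1] for r in rows], b),
--             build([r[2] for r in rows], c))
-- ===== Notes on version B (the rewrite author's own statement) =====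
-- stated objective: simpler
-- what changed: B zips the three parallel lists into rows and applies one factored build(column, ch) helper per column (head, ' '.join with the middle words, last word appended with no separator), replacing A's single per-index loop that branches on first/last/middle while growing three accumulator strings; Pre_ excludes only the inputs on which A raises IndexError (b_words or c_words shorter than a_words, or an empty a/b/c string read for its first character when the three first words coincide).
import Mathlib
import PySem

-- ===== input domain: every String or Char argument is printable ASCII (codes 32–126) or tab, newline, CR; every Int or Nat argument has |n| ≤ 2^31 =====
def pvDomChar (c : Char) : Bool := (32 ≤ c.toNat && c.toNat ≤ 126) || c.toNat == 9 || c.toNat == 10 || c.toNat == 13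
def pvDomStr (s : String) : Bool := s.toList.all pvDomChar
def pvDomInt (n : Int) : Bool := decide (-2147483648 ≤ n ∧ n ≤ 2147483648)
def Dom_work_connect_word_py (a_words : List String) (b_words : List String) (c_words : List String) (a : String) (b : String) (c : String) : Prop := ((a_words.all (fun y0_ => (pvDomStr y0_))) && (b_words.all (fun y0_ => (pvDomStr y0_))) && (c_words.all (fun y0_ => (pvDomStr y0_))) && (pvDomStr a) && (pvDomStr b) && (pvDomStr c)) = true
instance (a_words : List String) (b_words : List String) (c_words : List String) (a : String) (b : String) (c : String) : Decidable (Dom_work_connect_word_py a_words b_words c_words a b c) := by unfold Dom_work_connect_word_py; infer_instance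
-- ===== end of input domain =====

-- B zips the three parallel lists into rows and builds each column with one factored
-- helper (head, ' '.join with the middle words, last word appended with no separator),
-- instead of A's per-index first/last/middle branching loop over three accumulator strings:
-- a simpler decomposition.

-- ===== PORT A =====
-- String concatenations are ported on List Char (String.toList / String.ofList); indexing a[0] and
-- slicing w[1:] use the PySem total forms, exact under Pre_ (which excludes Python's IndexError inputs).
def work_connect_word_py (a_words : List String) (b_words : List String) (c_words : List String) (a : String) (b : String) (c : String) : String × String × String :=
  let n : Int := a_words.length
  let r := (PySem.List.pyRange 0 n 1).foldl (fun (acc : List Char × List Char × List Char) (jdx : Int) =>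
    let aj := PySem.List.pyGetD a_words jdx ""
    let bj := PySem.List.pyGetD b_words jdx ""
    let cj := PySem.List.pyGetD c_words jdx ""
    if jdx == 0 then
      if aj != bj || bj != cj || aj != cj then
        (acc.1 ++ aj.toList, acc.2.1 ++ bj.toList, acc.2.2 ++ cj.toList)
      else
        (acc.1 ++ PySem.List.pyGetD a.toList 0 ' ' :: PySem.List.slice aj.toList (some 1) none,
         acc.2.1 ++ PySem.List.pyGetD b.toList 0 ' ' :: PySem.List.slice bj.toList (some 1) none,
         acc.2.2 ++ PySem.List.pyGetD c.toList 0 ' ' :: PySem.List.slice cj.toList (some 1) none)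
    else if jdx == n - 1 then
      (acc.1 ++ aj.toList, acc.2.1 ++ bj.toList, acc.2.2 ++ cj.toList)
    else
      (acc.1 ++ ' ' :: aj.toList, acc.2.1 ++ ' ' :: bj.toList, acc.2.2 ++ ' ' :: cj.toList))
    (([] : List Char), ([] : List Char), ([] : List Char))
  (String.ofList r.1, String.ofList r.2.1, String.ofList r.2.2)

-- ===== PORT B =====
-- build(words, ch) of Source B
def wcwBuild (allEq : Bool) (words : List String) (ch : String) : List Char :=
  match words with
  | [] => []                                                   -- ''
  | w0 :: _ =>
    let head : List Char :=
      if allEq then PySem.List.pyGetD ch.toList 0 ' ' :: PySem.List.slice w0.toList (some 1) none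
      else w0.toList
    if words.length == 1 then head
    else PySem.Chars.join [' '] (head :: (PySem.List.slice words (some 1) (some (-1))).map String.toList)
           ++ (PySem.List.pyGetD words (-1) "").toList

def work_connect_word_py_alt (a_words : List String) (b_words : List String) (c_words : List String) (a : String) (b : String) (c : String) : String × String × String :=
  let rows := a_words.zip (b_words.zip c_words)                -- list(zip(a_words, b_words, c_words))
  let allEq := match rows.head? with                           -- bool(rows) and rows[0][0]==rows[0][1]==rows[0][2]
    | some (x, y, z) => x == y && y == z
    | none => false
  (String.ofList (wcwBuild allEq (rows.map (·.1)) a),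
   String.ofList (wcwBuild allEq (rows.map (·.2.1)) b),
   String.ofList (wcwBuild allEq (rows.map (·.2.2)) c))

-- ===== PRECONDITION & SPEC =====
-- Pre_ is exactly A's return domain: every iteration indexes b_words[jdx] and c_words[jdx]
-- (IndexError when either list is shorter than a_words), and when the three first words are
-- all equal A reads a[0], b[0], c[0] (IndexError on an empty string).
def Pre_work_connect_word_py (a_words : List String) (b_words : List String) (c_words : List String) (a : String) (b : String) (c : String) : Prop :=
  a_words.length ≤ b_words.length ∧ a_words.length ≤ c_words.length ∧
  ((a_words ≠ [] ∧ a_words.head? = b_words.head? ∧ b_words.head? = c_words.head?) →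
    (a ≠ "" ∧ b ≠ "" ∧ c ≠ ""))
instance (a_words : List String) (b_words : List String) (c_words : List String) (a : String) (b : String) (c : String) : Decidable (Pre_work_connect_word_py a_words b_words c_words a b c) := by unfold Pre_work_connect_word_py; infer_instance

def pvWitness_work_connect_word_py : List String × List String × List String × String × String × String :=
  (["hi", "there now", "world"], ["hi", "xx", "yy"], ["hi", "zz", "ww"], "A", "B", "C")

def Spec_work_connect_word_py (a_words : List String) (b_words : List String) (c_words : List String) (a : String) (b : String) (c : String) (out : String × String × String) : Prop := out = work_connect_word_py_alt a_words b_words c_words a b c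
instance (a_words : List String) (b_words : List String) (c_words : List String) (a : String) (b : String) (c : String) (out : String × String × String) : Decidable (Spec_work_connect_word_py a_words b_words c_words a b c out) := by unfold Spec_work_connect_word_py; infer_instance

-- ===== CLAIM (what is proved, stated in full; the proofs are below) =====
def Claim_equal_work_connect_word_py : Prop := ∀ (a_words : List String) (b_words : List String) (c_words : List String) (a : String) (b : String) (c : String), Dom_work_connect_word_py a_words b_words c_words a b c → Pre_work_connect_word_py a_words b_words c_words a b c → Spec_work_connect_word_py a_words b_words c_words a b c (work_connect_word_py a_words b_words c_words a b c)

-- ===== LEMMAS AND PROOFS =====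

-- the string A's loop appends at index 0 (for the list ws ∈ {a_words, b_words, c_words} and its string ch)
def pvHead (a_words b_words c_words : List String) (ch : String) (ws : List String) : List Char :=
  if PySem.List.pyGetD a_words 0 "" != PySem.List.pyGetD b_words 0 "" ||
     PySem.List.pyGetD b_words 0 "" != PySem.List.pyGetD c_words 0 "" ||
     PySem.List.pyGetD a_words 0 "" != PySem.List.pyGetD c_words 0 ""
  then (PySem.List.pyGetD ws 0 "").toList
  else PySem.List.pyGetD ch.toList 0 ' ' :: PySem.List.slice (PySem.List.pyGetD ws 0 "").toList (some 1) none

-- what A's loop appends at index j, for one of the three components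
def pvPayload (H : List Char) (ws : List String) (n : Int) (j : Int) : List Char :=
  if j == 0 then H
  else if j == n - 1 then (PySem.List.pyGetD ws j "").toList
  else ' ' :: (PySem.List.pyGetD ws j "").toList

theorem pvMidFold (H : List Char) (ws : List String) (n : Nat) (hlen : n ≤ ws.length) :
    ∀ (k s : Nat) (acc : List Char), k = n - s → 1 ≤ s → s < n →
      (PySem.List.pyRange (s : Int) (n : Int) 1).foldl (fun acc j => acc ++ pvPayload H ws (n : Int) j) acc
      = acc ++ ((ws.drop s).take (n - 1 - s)).flatMap (fun w => ' ' :: w.toList)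
            ++ (PySem.List.pyGetD ws ((n : Int) - 1) "").toList := by
  intro k
  induction k with
  | zero => intro s acc hk h1 h2; omega
  | succ k ih =>
    intro s acc hk h1 h2
    rw [PySem.List.pyRange_one_cons (by exact_mod_cast h2)]
    by_cases hlast : s + 1 = n
    · -- s is the last index n-1
      have hnil : PySem.List.pyRange ((s : Int) + 1) (n : Int) 1 = [] :=
        PySem.List.pyRange_one_eq_nil (by omega)
      simp only [List.foldl_cons, hnil, List.foldl_nil, pvPayload]
      have : ((s : Int) == 0) = false := by simp; omega
      rw [this]
      have : ((s : Int) == (n : Int) - 1) = true := by simp; omega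
      rw [this]
      simp only [Bool.false_eq_true, if_false, if_true]
      have : n - 1 - s = 0 := by omega
      rw [this]
      have : (s : Int) = (n : Int) - 1 := by omega
      rw [this]
      simp
    · -- s is a middle index
      simp only [List.foldl_cons]
      have hstep : pvPayload H ws (n : Int) (s : Int) = ' ' :: (PySem.List.pyGetD ws (s : Int) "").toList := by
        unfold pvPayload
        have h0 : ((s : Int) == 0) = false := by simp; omega
        have hl : ((s : Int) == (n : Int) - 1) = false := by simp; omega
        rw [h0, hl]; simp
      rw [hstep]
      have hcast : (s : Int) + 1 = ((s + 1 : Nat) : Int) := by push_cast; ring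
      rw [hcast, ih (s + 1) _ (by omega) (by omega) (by omega)]
      have hs : s < ws.length := by omega
      have hdrop : ws.drop s = ws[s] :: ws.drop (s + 1) := List.drop_eq_getElem_cons hs
      have htake : (ws.drop s).take (n - 1 - s) = ws[s] :: (ws.drop (s + 1)).take (n - 1 - (s + 1)) := by
        rw [hdrop]
        have : n - 1 - s = (n - 1 - (s + 1)) + 1 := by omega
        rw [this, List.take_succ_cons]
      rw [htake, List.flatMap_cons, PySem.List.pyGetD_ofNat ws s "" hs]
      simp [List.append_assoc]

theorem pvPayloadFold (H : List Char) (ws : List String) (n : Nat) (h1 : 1 ≤ n) (hlen : n ≤ ws.length) :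
    (PySem.List.pyRange 0 (n : Int) 1).foldl (fun acc j => acc ++ pvPayload H ws (n : Int) j) []
    = if n = 1 then H
      else H ++ ((ws.drop 1).take (n - 2)).flatMap (fun w => ' ' :: w.toList)
             ++ (PySem.List.pyGetD ws ((n : Int) - 1) "").toList := by
  rw [PySem.List.pyRange_one_cons (by exact_mod_cast h1)]
  simp only [List.foldl_cons]
  have hH : (([] : List Char) ++ pvPayload H ws (n : Int) 0) = H := by simp [pvPayload]
  rw [hH]
  by_cases hn1 : n = 1
  · subst hn1
    rw [show (0 : Int) + 1 = (1 : Int) by ring, PySem.List.pyRange_one_eq_nil (by omega)]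
    simp
  · rw [if_neg hn1]
    rw [show (0 : Int) + 1 = ((1 : Nat) : Int) by norm_num]
    rw [pvMidFold H ws n hlen (n - 1) 1 H rfl (by omega) (by omega)]
    have : n - 1 - 1 = n - 2 := by omega
    rw [this]

-- ' '.join(head :: l) laid out as head followed by each element prefixed with a space
theorem pvJoinSpace (h : List Char) (l : List (List Char)) :
    PySem.Chars.join [' '] (h :: l) = h ++ l.flatMap (fun w => ' ' :: w) := by
  induction l generalizing h with
  | nil => simp [PySem.Chars.join_singleton]
  | cons w rest ih =>
    rw [PySem.Chars.join_cons_cons, ih w, List.flatMap_cons]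
    simp

-- B's build applied to the first n words, in the same normal form as A's fold
theorem pvBuildEq (allEq : Bool) (ws : List String) (ch : String) (n : Nat)
    (h1 : 1 ≤ n) (hlen : n ≤ ws.length) :
    wcwBuild allEq (ws.take n) ch
    = if n = 1 then (if allEq then PySem.List.pyGetD ch.toList 0 ' ' :: PySem.List.slice (PySem.List.pyGetD ws 0 "").toList (some 1) none else (PySem.List.pyGetD ws 0 "").toList)
      else (if allEq then PySem.List.pyGetD ch.toList 0 ' ' :: PySem.List.slice (PySem.List.pyGetD ws 0 "").toList (some 1) none else (PySem.List.pyGetD ws 0 "").toList)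
             ++ ((ws.drop 1).take (n - 2)).flatMap (fun w => ' ' :: w.toList)
             ++ (PySem.List.pyGetD ws ((n : Int) - 1) "").toList := by
  unfold wcwBuild
  cases ws with
  | nil => simp at hlen; omega
  | cons w t =>
    obtain ⟨m, rfl⟩ : ∃ m, n = m + 1 := ⟨n - 1, by omega⟩
    have hm : m ≤ t.length := by simpa using hlen
    rw [List.take_succ_cons]
    simp only [PySem.List.pyGetD_zero_cons]
    by_cases hm0 : m = 0
    · subst hm0
      simp
    · have hlen1 : (w :: List.take m t).length = m + 1 := by simp [Nat.min_eq_left hm]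
      have hne1 : ((w :: List.take m t).length == 1) = false := by
        simp [hlen1]; omega
      rw [hne1]
      simp only [Bool.false_eq_true, if_false]
      rw [if_neg (show ¬ (m + 1 = 1) from by omega)]
      have hslice : PySem.List.slice (w :: List.take m t) (some 1) (some (-1)) = List.take (m - 1) t := by
        simp [PySem.List.slice]
        rw [List.take_take]
        congr 1
        omega
      have htne : List.take m t ≠ [] := by
        intro h
        have := congrArg List.length h
        simp [Nat.min_eq_left hm] at this
        omega
      have hlast : PySem.List.pyGetD (w :: List.take m t) (-1) "" = t[m-1]'(by omega) := by
        rw [PySem.List.pyGetD_neg_one _ _ (by simp)]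
        rw [List.getLast_cons htne, List.getLast_eq_getElem htne]
        simp only [List.getElem_take]
        congr 1
        simp [Nat.min_eq_left hm]
      have hrlast : PySem.List.pyGetD (w :: t) (((m + 1 : Nat) : Int) - 1) "" = t[m-1]'(by omega) := by
        have : ((m + 1 : Nat) : Int) - 1 = ((m : Nat) : Int) := by push_cast; ring
        rw [this, PySem.List.pyGetD_ofNat _ _ _ (by simp; omega)]
        simp [List.getElem_cons, hm0]
      rw [pvJoinSpace, List.flatMap_map, hslice, hlast, hrlast]
      simp [List.append_assoc, show m + 1 - 2 = m - 1 from by omega]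

-- the common normal form of both programs, one component
def pvNF (a_words b_words c_words : List String) (ch : String) (ws : List String) : List Char :=
  if a_words.length = 0 then []
  else if a_words.length = 1 then pvHead a_words b_words c_words ch ws
  else pvHead a_words b_words c_words ch ws
         ++ ((ws.drop 1).take (a_words.length - 2)).flatMap (fun w => ' ' :: w.toList)
         ++ (PySem.List.pyGetD ws ((a_words.length : Int) - 1) "").toList

theorem pvAEval (a_words b_words c_words : List String) (a b c : String)
    (hb : a_words.length ≤ b_words.length) (hc : a_words.length ≤ c_words.length) :
    work_connect_word_py a_words b_words c_words a b c =
      (String.ofList (pvNF a_words b_words c_words a a_words),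
       String.ofList (pvNF a_words b_words c_words b b_words),
       String.ofList (pvNF a_words b_words c_words c c_words)) := by
  simp only [work_connect_word_py]
  have hstep : (fun (acc : List Char × List Char × List Char) (jdx : Int) =>
      let aj := PySem.List.pyGetD a_words jdx ""
      let bj := PySem.List.pyGetD b_words jdx ""
      let cj := PySem.List.pyGetD c_words jdx ""
      if jdx == 0 then
        if aj != bj || bj != cj || aj != cj then
          (acc.1 ++ aj.toList, acc.2.1 ++ bj.toList, acc.2.2 ++ cj.toList)
        else
          (acc.1 ++ PySem.List.pyGetD a.toList 0 ' ' :: PySem.List.slice aj.toList (some 1) none,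
           acc.2.1 ++ PySem.List.pyGetD b.toList 0 ' ' :: PySem.List.slice bj.toList (some 1) none,
           acc.2.2 ++ PySem.List.pyGetD c.toList 0 ' ' :: PySem.List.slice cj.toList (some 1) none)
      else if jdx == (a_words.length : Int) - 1 then
        (acc.1 ++ aj.toList, acc.2.1 ++ bj.toList, acc.2.2 ++ cj.toList)
      else
        (acc.1 ++ ' ' :: aj.toList, acc.2.1 ++ ' ' :: bj.toList, acc.2.2 ++ ' ' :: cj.toList))
    = (fun (acc : List Char × List Char × List Char) (jdx : Int) =>
        (acc.1 ++ pvPayload (pvHead a_words b_words c_words a a_words) a_words (a_words.length : Int) jdx,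
         acc.2.1 ++ pvPayload (pvHead a_words b_words c_words b b_words) b_words (a_words.length : Int) jdx,
         acc.2.2 ++ pvPayload (pvHead a_words b_words c_words c c_words) c_words (a_words.length : Int) jdx)) := by
    funext acc j
    by_cases hj : j = 0
    · subst hj
      simp only [pvPayload, pvHead, beq_self_eq_true, if_true]
      split_ifs <;> rfl
    · have hj' : (j == 0) = false := by simp [hj]
      simp only [pvPayload, hj', Bool.false_eq_true, if_false]
      by_cases hl : j = (a_words.length : Int) - 1
      · simp [hl]
      · simp [show (j == (a_words.length : Int) - 1) = false from by simp [hl]]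
  rw [hstep]
  rw [PySem.List.foldl_prod_mk
        (fun (x : List Char) (j : Int) => x ++ pvPayload (pvHead a_words b_words c_words a a_words) a_words (a_words.length : Int) j)
        (fun (tch : List Char × List Char) (j : Int) =>
          (tch.1 ++ pvPayload (pvHead a_words b_words c_words b b_words) b_words (a_words.length : Int) j,
           tch.2 ++ pvPayload (pvHead a_words b_words c_words c c_words) c_words (a_words.length : Int) j))]
  rw [PySem.List.foldl_prod_mk
        (fun (x : List Char) (j : Int) => x ++ pvPayload (pvHead a_words b_words c_words b b_words) b_words (a_words.length : Int) j)
        (fun (x : List Char) (j : Int) => x ++ pvPayload (pvHead a_words b_words c_words c c_words) c_words (a_words.length : Int) j)]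
  by_cases h0 : a_words.length = 0
  · rw [h0]
    rw [PySem.List.pyRange_one_eq_nil (by norm_num)]
    simp [pvNF, h0]
  · have h1 : 1 ≤ a_words.length := by omega
    rw [pvPayloadFold _ a_words _ h1 le_rfl,
        pvPayloadFold _ b_words _ h1 hb,
        pvPayloadFold _ c_words _ h1 hc]
    simp only [pvNF, h0, if_false]

theorem pvHeadEq (a_words b_words c_words : List String) (ch : String) (ws : List String)
    (hne : a_words ≠ []) :
    (if (!a_words.isEmpty &&
          (PySem.List.pyGetD a_words 0 "" == PySem.List.pyGetD b_words 0 "" &&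
           PySem.List.pyGetD b_words 0 "" == PySem.List.pyGetD c_words 0 ""))
     then PySem.List.pyGetD ch.toList 0 ' ' :: PySem.List.slice (PySem.List.pyGetD ws 0 "").toList (some 1) none
     else (PySem.List.pyGetD ws 0 "").toList)
    = pvHead a_words b_words c_words ch ws := by
  unfold pvHead
  cases a_words with
  | nil => exact absurd rfl hne
  | cons w t =>
    simp only [List.isEmpty_cons, Bool.not_false, Bool.true_and, PySem.List.pyGetD_zero_cons,
      Bool.and_eq_true, beq_iff_eq, Bool.or_eq_true, bne_iff_ne, ne_eq]
    by_cases h1 : w = PySem.List.pyGetD b_words 0 ""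
    · by_cases h2 : PySem.List.pyGetD b_words 0 "" = PySem.List.pyGetD c_words 0 ""
      · have h3 := h1.trans h2
        rw [if_pos ⟨h1, h2⟩, if_neg (by tauto)]
      · rw [if_neg (fun h => h2 h.2), if_pos (Or.inl (Or.inr h2))]
    · rw [if_neg (fun h => h1 h.1), if_pos (Or.inl (Or.inl h1))]

-- the columns of zip(a_words, b_words, c_words), when b_words and c_words are long enough
theorem pvZipCols (a_words b_words c_words : List String)
    (hb : a_words.length ≤ b_words.length) (hc : a_words.length ≤ c_words.length) :
    ((a_words.zip (b_words.zip c_words)).map (·.1) = a_words) ∧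
    ((a_words.zip (b_words.zip c_words)).map (·.2.1) = b_words.take a_words.length) ∧
    ((a_words.zip (b_words.zip c_words)).map (·.2.2) = c_words.take a_words.length) := by
  induction a_words generalizing b_words c_words with
  | nil => simp
  | cons x xs ih =>
    cases b_words with
    | nil => simp at hb
    | cons y ys =>
      cases c_words with
      | nil => simp at hc
      | cons z zs =>
        have := ih ys zs (by simpa using hb) (by simpa using hc)
        simp [List.zip_cons_cons, this.1, this.2.1, this.2.2]

-- B's all_equal flag, rewritten as the pyGetD comparison pvHeadEq expects
theorem pvAllEqEq (a_words b_words c_words : List String)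
    (hb : a_words.length ≤ b_words.length) (hc : a_words.length ≤ c_words.length) :
    (match (a_words.zip (b_words.zip c_words)).head? with
     | some (x, y, z) => x == y && y == z
     | none => false)
    = (!a_words.isEmpty &&
        (PySem.List.pyGetD a_words 0 "" == PySem.List.pyGetD b_words 0 "" &&
         PySem.List.pyGetD b_words 0 "" == PySem.List.pyGetD c_words 0 "")) := by
  cases a_words with
  | nil => simp
  | cons x xs =>
    cases b_words with
    | nil => simp at hb
    | cons y ys =>
      cases c_words with
      | nil => simp at hc
      | cons z zs => simp [List.zip_cons_cons]

-- the first column is a_words itself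
theorem pvBuildEqSelf (allEq : Bool) (ws : List String) (ch : String) (h1 : 1 ≤ ws.length) :
    wcwBuild allEq ws ch
    = if ws.length = 1 then (if allEq then PySem.List.pyGetD ch.toList 0 ' ' :: PySem.List.slice (PySem.List.pyGetD ws 0 "").toList (some 1) none else (PySem.List.pyGetD ws 0 "").toList)
      else (if allEq then PySem.List.pyGetD ch.toList 0 ' ' :: PySem.List.slice (PySem.List.pyGetD ws 0 "").toList (some 1) none else (PySem.List.pyGetD ws 0 "").toList)
             ++ ((ws.drop 1).take (ws.length - 2)).flatMap (fun w => ' ' :: w.toList)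
             ++ (PySem.List.pyGetD ws ((ws.length : Int) - 1) "").toList := by
  have h := pvBuildEq allEq ws ch ws.length h1 le_rfl
  rwa [List.take_length] at h

theorem pvBEval (a_words b_words c_words : List String) (a b c : String)
    (hb : a_words.length ≤ b_words.length) (hc : a_words.length ≤ c_words.length) :
    work_connect_word_py_alt a_words b_words c_words a b c =
      (String.ofList (pvNF a_words b_words c_words a a_words),
       String.ofList (pvNF a_words b_words c_words b b_words),
       String.ofList (pvNF a_words b_words c_words c c_words)) := by
  simp only [work_connect_word_py_alt]
  obtain ⟨hca, hcb, hcc⟩ := pvZipCols a_words b_words c_words hb hc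
  rw [hca, hcb, hcc, pvAllEqEq a_words b_words c_words hb hc]
  by_cases h0 : a_words = []
  · subst h0
    simp [wcwBuild, pvNF]
  · have h1 : 1 ≤ a_words.length := by
      cases a_words with
      | nil => exact absurd rfl h0
      | cons w t => simp
    rw [pvBuildEqSelf _ a_words a h1,
        pvBuildEq _ b_words b _ h1 hb,
        pvBuildEq _ c_words c _ h1 hc]
    rw [pvHeadEq a_words b_words c_words a a_words h0,
        pvHeadEq a_words b_words c_words b b_words h0,
        pvHeadEq a_words b_words c_words c c_words h0]
    simp only [pvNF, show ¬ (a_words.length = 0) from by omega, if_false]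

-- ===== VERDICT (by name: the statement is the Claim_ definition above) =====
theorem work_connect_word_py_spec : Claim_equal_work_connect_word_py := by
  intro a_words b_words c_words a b c hDom hPre
  unfold Spec_work_connect_word_py
  obtain ⟨hb, hc, -⟩ := hPre
  rw [pvAEval a_words b_words c_words a b c hb hc,
      pvBEval a_words b_words c_words a b c hb hc]
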